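-- pv_equiv track=rewrite | github.com/sinnappan93/flappy_snake | flappy_snake/ville.py | liste_fenetres_horizontale
-- ===== SOURCE A (Python) =====
-- def liste_fenetres_horizontale(coords,espace,large):
-- 	lst_horizon=[]
-- 	x0=coords[0]
-- 	while x0<coords[2]-(espace+large):
-- 		x0+=espace
-- 		x1=x0+large
-- 		lst_horizon.append([x0,x1])    #x0 correspond au "ax", et x1 au "bx" (d'après la documentation upemtk)
-- 		x0=x1    #ici je passe aux coordonnées de la fenêtre suivante
-- 	return lst_horizon
-- ===== SOURCE B (Python) =====
-- def liste_fenetres_horizontale(coords, espace, large):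
--     step = espace + large
--     c0, c2 = coords[0], coords[2]
--     if c0 >= c2 - step:
--         return []
--     # number of iterations of the original loop: ceil((c2 - step - c0) / step)
--     n = -((c0 - (c2 - step)) // step)
--     return [[c0 + espace + i * step, c0 + step + i * step] for i in range(n)]
-- ===== Notes on version B (the rewrite author's own statement) =====
-- stated objective: alternative
-- what changed: Replaces A's stateful while-loop accumulation (x0 advancing by espace+large each pass) with a closed-form iteration count via ceiling division and a direct indexed comprehension computing each pair by arithmetic on i.
import Mathlib
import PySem

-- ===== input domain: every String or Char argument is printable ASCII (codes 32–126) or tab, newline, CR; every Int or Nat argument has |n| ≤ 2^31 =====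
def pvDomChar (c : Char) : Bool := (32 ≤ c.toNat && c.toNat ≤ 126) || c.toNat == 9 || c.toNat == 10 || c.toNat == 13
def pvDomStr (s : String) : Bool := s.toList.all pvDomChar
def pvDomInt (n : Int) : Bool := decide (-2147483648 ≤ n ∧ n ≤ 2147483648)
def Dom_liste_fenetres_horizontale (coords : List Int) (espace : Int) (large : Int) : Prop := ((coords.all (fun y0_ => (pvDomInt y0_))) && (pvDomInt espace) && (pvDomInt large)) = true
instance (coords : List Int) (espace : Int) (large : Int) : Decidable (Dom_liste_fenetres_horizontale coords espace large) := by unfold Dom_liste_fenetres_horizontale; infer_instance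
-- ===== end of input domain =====

-- B replaces A's stateful while-loop accumulation by a closed-form iteration count
-- (ceiling division) and a direct indexed comprehension; objective: alternative decomposition.

-- ===== PORT A =====
-- the while loop: x0 += espace; x1 = x0 + large; append [x0, x1]; x0 = x1.
-- The inner guard '0 < espace + large' only makes the recursion total: when it fails while
-- the loop guard holds, Python A never terminates (excluded by Pre_).
def pvLoopA (c2 espace large x0 : Int) (acc : List (List Int)) : List (List Int) :=
  if _h1 : x0 < c2 - (espace + large) then
    if _h2 : 0 < espace + large then
      pvLoopA c2 espace large (x0 + espace + large) (acc ++ [[x0 + espace, x0 + espace + large]])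
    else acc
  else acc
termination_by (c2 - (espace + large) - x0).toNat
decreasing_by omega

def liste_fenetres_horizontale (coords : List Int) (espace : Int) (large : Int) : List (List Int) :=
  match PySem.List.pyGet? coords 0, PySem.List.pyGet? coords 2 with
  | some c0, some c2 => pvLoopA c2 espace large c0 []
  | _, _ => []  -- IndexError in Python (outside Pre_)

-- ===== PORT B =====
def liste_fenetres_horizontale_alt (coords : List Int) (espace : Int) (large : Int) : List (List Int) :=
  -- Option.elim handles the IndexError cases (outside Pre_)
  (PySem.List.pyGet? coords 0).elim [] fun c0 =>
    (PySem.List.pyGet? coords 2).elim [] fun c2 =>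
      let step := espace + large
      if c2 - step ≤ c0 then []
      else
        let n := -(PySem.Int.floordiv (c0 - (c2 - step)) step)
        (PySem.List.pyRange 0 n 1).map (fun i => [c0 + espace + i * step, c0 + step + i * step])

-- ===== PRECONDITION & SPEC =====
-- Pre_ excludes exactly: coords shorter than 3 (A raises IndexError) and inputs where the
-- loop guard holds with a non-positive step espace+large (A never terminates).
def Pre_liste_fenetres_horizontale (coords : List Int) (espace : Int) (large : Int) : Prop :=
  3 ≤ coords.length ∧
    (0 < espace + large ∨ coords.getD 2 0 - (espace + large) ≤ coords.getD 0 0)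
instance (coords : List Int) (espace : Int) (large : Int) : Decidable (Pre_liste_fenetres_horizontale coords espace large) := by unfold Pre_liste_fenetres_horizontale; infer_instance

def pvWitness_liste_fenetres_horizontale : List Int × Int × Int := ([0, 0, 10], 1, 2)

def Spec_liste_fenetres_horizontale (coords : List Int) (espace : Int) (large : Int) (out : List (List Int)) : Prop := out = liste_fenetres_horizontale_alt coords espace large
instance (coords : List Int) (espace : Int) (large : Int) (out : List (List Int)) : Decidable (Spec_liste_fenetres_horizontale coords espace large out) := by unfold Spec_liste_fenetres_horizontale; infer_instance

-- ===== CLAIM (what is proved, stated in full; the proofs are below) =====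
def Claim_equal_liste_fenetres_horizontale : Prop := ∀ (coords : List Int) (espace : Int) (large : Int), Dom_liste_fenetres_horizontale coords espace large → Pre_liste_fenetres_horizontale coords espace large → Spec_liste_fenetres_horizontale coords espace large (liste_fenetres_horizontale coords espace large)

-- ===== LEMMAS AND PROOFS =====

-- closed form of one loop, for positive step
lemma pvLoopA_eq (c2 espace large : Int) (h : 0 < espace + large) :
    ∀ (x0 : Int) (acc : List (List Int)),
      pvLoopA c2 espace large x0 acc =
        acc ++ (PySem.List.pyRange 0
            (-(PySem.Int.floordiv (x0 - (c2 - (espace + large))) (espace + large))) 1).map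
          (fun i => [x0 + espace + i * (espace + large),
                     x0 + (espace + large) + i * (espace + large)]) := by
  intro x0 acc
  induction x0, acc using pvLoopA.induct c2 espace large with
  | case1 x0 acc h1 h2 ih =>
      rw [pvLoopA]
      simp only [dif_pos h1, dif_pos h2]
      rw [ih]
      have hN : 1 ≤ -(PySem.Int.floordiv (x0 - (c2 - (espace + large))) (espace + large)) := by
        have := (PySem.Int.floordiv_lt_iff_lt_mul
          (a := x0 - (c2 - (espace + large))) (b := espace + large) (q := 0) h).mpr (by omega)
        omega
      set N := -(PySem.Int.floordiv (x0 - (c2 - (espace + large))) (espace + large)) with hNdef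
      have hshift : -(PySem.Int.floordiv (x0 + espace + large - (c2 - (espace + large)))
          (espace + large)) = N - 1 := by
        have harg : x0 + espace + large - (c2 - (espace + large))
            = (x0 - (c2 - (espace + large))) + 1 * (espace + large) := by ring
        rw [harg, hNdef]
        rw [PySem.Int.floordiv_eq_ediv_of_pos h, PySem.Int.floordiv_eq_ediv_of_pos h]
        rw [Int.add_mul_ediv_right _ _ (by omega : espace + large ≠ 0)]
        ring
      rw [hshift]
      rw [PySem.List.pyRange_one 0 N, PySem.List.pyRange_one 0 (N - 1)]
      have hcount : (N - 0).toNat = (N - 1 - 0).toNat + 1 := by omega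
      rw [hcount, List.range_succ_eq_map]
      simp only [List.map_cons, List.map_map, List.append_assoc, List.singleton_append]
      congr 1
      refine List.cons_eq_cons.mpr ⟨by norm_num; ring, ?_⟩
      apply List.map_congr_left
      intro k _
      simp only [Function.comp_apply, Nat.succ_eq_add_one]
      push_cast
      norm_num
      constructor <;> ring
  | case2 x0 acc h1 h2 =>
      rw [pvLoopA]
      simp only [dif_pos h1, dif_neg h2]
      omega
  | case3 x0 acc h1 =>
      rw [pvLoopA]
      simp only [dif_neg h1]
      have h0 : 0 ≤ PySem.Int.floordiv (x0 - (c2 - (espace + large))) (espace + large) := by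
        exact (PySem.Int.le_floordiv_iff_mul_le
          (a := x0 - (c2 - (espace + large))) (b := espace + large) (q := 0) h).mpr (by omega)
      rw [PySem.List.pyRange_one_eq_nil (by omega)]
      simp

-- ===== VERDICT (by name: the statement is the Claim_ definition above) =====
theorem liste_fenetres_horizontale_spec : Claim_equal_liste_fenetres_horizontale := by
  intro coords espace large _hdom hpre
  obtain ⟨hlen, hstep⟩ := hpre
  match coords, hlen with
  | a :: b :: c :: rest, _ =>
    have e0 : PySem.List.pyGet? (a :: b :: c :: rest) 0 = some a := by
      simp [PySem.List.pyGet?, PySem.List.pyIdx?]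
      rw [if_pos (by omega)]
      simp
    have e2 : PySem.List.pyGet? (a :: b :: c :: rest) 2 = some c := by
      simp [PySem.List.pyGet?, PySem.List.pyIdx?]
      rw [if_pos (by omega)]
      simp
    unfold Spec_liste_fenetres_horizontale liste_fenetres_horizontale
      liste_fenetres_horizontale_alt
    rw [e0, e2]
    dsimp only [Option.elim]
    simp only [List.getD, List.getElem?_cons_zero, List.getElem?_cons_succ, Option.getD_some] at hstep
    by_cases hle : c - (espace + large) ≤ a
    · rw [if_pos hle, pvLoopA]
      rw [dif_neg (by omega)]
    · rw [if_neg hle]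
      have hpos : 0 < espace + large := by
        rcases hstep with hp | hp
        · exact hp
        · omega
      rw [pvLoopA_eq c espace large hpos a []]
      simp
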